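-- pv_equiv track=rewrite | github.com/yash-amd/shark-ai | sharktank/sharktank/types/pipelining.py | distribute_blocks_uniformly_over_pipeline_stages
-- ===== SOURCE A (Python) =====
-- def distribute_blocks_uniformly_over_pipeline_stages(
--     block_count: int, pipeline_parallelism_size: int, tensor_parallelism_size: int
-- ) -> tuple[list[int] | None, list[list[int]] | None]:
--     """
--     Default distribution procedure for blocks over pipeline stages.
--     This does not take into account any differences in computation time between blocks.
--     Nor does it account for any pre- and post-processing (e.g. token embedding and output normalization).
--
--     It is assumed that if block_count % pipeline_parallelism_size != 0, then any stages with more blocks than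
--     the average will have enough memory to hold the additional blocks.
--
--     Args:
--         block_count: The number of blocks to distribute.
--         pipeline_parallelism_size: The number of pipeline stages to distribute the blocks over.
--         tensor_parallelism_size: The number of devices to distribute each block over.
--
--     Returns:
--         A tuple containing:
--             - A list mapping each block to its corresponding pipeline stage.
--             - A list mapping each pipeline stage to the devices it uses.
--             If pipeline_parallelism_size is 1, both lists will be None.
--     """
--
--     if pipeline_parallelism_size == 1:
--         return None, None
--
--     block_to_pipeline_stage = [
--         i * pipeline_parallelism_size // block_count for i in range(block_count)
--     ]
--     pipeline_stage_to_devices = [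
--         [p * tensor_parallelism_size + d for d in range(tensor_parallelism_size)]
--         for p in range(pipeline_parallelism_size)
--     ]
--
--     return block_to_pipeline_stage, pipeline_stage_to_devices
-- ===== SOURCE B (Python) =====
-- def distribute_blocks_uniformly_over_pipeline_stages(
--     block_count: int, pipeline_parallelism_size: int, tensor_parallelism_size: int
-- ) -> tuple[list[int] | None, list[list[int]] | None]:
--     """Per-stage range fill: instead of computing a stage per block, fill the
--     contiguous block range [ceil(p*bc/pp), ceil((p+1)*bc/pp)) of each stage p."""
--     if pipeline_parallelism_size == 1:
--         return None, None
--
--     pp = pipeline_parallelism_size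
--     tp = tensor_parallelism_size
--     block_to_pipeline_stage = []
--     start = 0
--     for p in range(pp):
--         nxt = -(-(p + 1) * block_count // pp)
--         block_to_pipeline_stage.extend([p] * (nxt - start))
--         start = nxt
--     pipeline_stage_to_devices = [list(range(p * tp, (p + 1) * tp)) for p in range(pp)]
--
--     return block_to_pipeline_stage, pipeline_stage_to_devices
-- ===== Notes on version B (the rewrite author's own statement) =====
-- stated objective: alternative
-- what changed: Replaces the per-block closed-form stage assignment (floor(i*pp/bc) for every block i) with a per-stage range fill that extends the list with stage p repeated over its ceil-boundary block range [ceil(p*bc/pp), ceil((p+1)*bc/pp)).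
-- outside the precondition, e.g. on distribute_blocks_uniformly_over_pipeline_stages(4, 0, 2): A returns ([0, 0, 0, 0], []), B returns ([], []); on distribute_blocks_uniformly_over_pipeline_stages(5, -2, 3): A returns ([0, -1, -1, -2, -2], []), B returns ([], [])
import Mathlib
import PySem

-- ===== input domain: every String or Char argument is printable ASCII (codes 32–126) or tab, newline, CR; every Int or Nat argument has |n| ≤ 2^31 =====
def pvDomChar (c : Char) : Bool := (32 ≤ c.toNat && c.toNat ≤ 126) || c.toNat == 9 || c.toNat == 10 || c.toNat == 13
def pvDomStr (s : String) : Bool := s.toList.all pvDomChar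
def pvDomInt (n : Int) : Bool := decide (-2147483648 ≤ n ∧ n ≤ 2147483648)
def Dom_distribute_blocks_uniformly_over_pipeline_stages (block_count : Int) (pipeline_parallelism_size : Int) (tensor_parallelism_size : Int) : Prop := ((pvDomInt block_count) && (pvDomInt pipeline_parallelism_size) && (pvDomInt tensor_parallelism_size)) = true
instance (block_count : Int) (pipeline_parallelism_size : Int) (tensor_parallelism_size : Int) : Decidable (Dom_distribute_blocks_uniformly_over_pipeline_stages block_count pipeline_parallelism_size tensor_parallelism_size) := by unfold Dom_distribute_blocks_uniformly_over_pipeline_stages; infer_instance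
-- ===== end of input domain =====

-- B replaces A's per-block closed-form stage assignment by a per-stage ceil-boundary range fill
-- (same cost, different decomposition); equivalence is proved on Pre_ (positive stage count, or no blocks).

-- ===== PORT A =====
def distribute_blocks_uniformly_over_pipeline_stages (block_count : Int) (pipeline_parallelism_size : Int) (tensor_parallelism_size : Int) : Option (List Int) × Option (List (List Int)) :=
  if pipeline_parallelism_size = 1 then (none, none)
  else
    (some ((PySem.List.pyRange 0 block_count 1).map
        (fun i => PySem.Int.floordiv (i * pipeline_parallelism_size) block_count)),
     some ((PySem.List.pyRange 0 pipeline_parallelism_size 1).map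
        (fun p => (PySem.List.pyRange 0 tensor_parallelism_size 1).map
          (fun d => p * tensor_parallelism_size + d))))

-- ===== PORT B =====
def distribute_blocks_uniformly_over_pipeline_stages_alt (block_count : Int) (pipeline_parallelism_size : Int) (tensor_parallelism_size : Int) : Option (List Int) × Option (List (List Int)) :=
  if pipeline_parallelism_size = 1 then (none, none)
  else
    let fill := (PySem.List.pyRange 0 pipeline_parallelism_size 1).foldl
      (fun (acc : List Int × Int) p =>
        let nxt := -(PySem.Int.floordiv (-(p + 1) * block_count) pipeline_parallelism_size)
        (acc.1 ++ PySem.List.pyRepeat [p] (nxt - acc.2), nxt))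
      ([], 0)
    (some fill.1,
     some ((PySem.List.pyRange 0 pipeline_parallelism_size 1).map
        (fun p => PySem.List.pyRange (p * tensor_parallelism_size)
          ((p + 1) * tensor_parallelism_size) 1)))

-- ===== PRECONDITION & SPEC =====
-- Pre_ excludes only the degenerate inputs with a nonpositive stage count but a positive block
-- count, on which A still assigns every block to a nonexistent (zero or negative) stage while B's
-- per-stage fill naturally produces no assignments; both are outside the function's natural domain.
def Pre_distribute_blocks_uniformly_over_pipeline_stages (block_count : Int) (pipeline_parallelism_size : Int) (tensor_parallelism_size : Int) : Prop :=
  0 < pipeline_parallelism_size ∨ block_count ≤ 0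
instance (block_count : Int) (pipeline_parallelism_size : Int) (tensor_parallelism_size : Int) : Decidable (Pre_distribute_blocks_uniformly_over_pipeline_stages block_count pipeline_parallelism_size tensor_parallelism_size) := by unfold Pre_distribute_blocks_uniformly_over_pipeline_stages; infer_instance

def pvWitness_distribute_blocks_uniformly_over_pipeline_stages : Int × Int × Int := (5, 2, 1)

def Spec_distribute_blocks_uniformly_over_pipeline_stages (block_count : Int) (pipeline_parallelism_size : Int) (tensor_parallelism_size : Int) (out : Option (List Int) × Option (List (List Int))) : Prop := out = distribute_blocks_uniformly_over_pipeline_stages_alt block_count pipeline_parallelism_size tensor_parallelism_size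
instance (block_count : Int) (pipeline_parallelism_size : Int) (tensor_parallelism_size : Int) (out : Option (List Int) × Option (List (List Int))) : Decidable (Spec_distribute_blocks_uniformly_over_pipeline_stages block_count pipeline_parallelism_size tensor_parallelism_size out) := by unfold Spec_distribute_blocks_uniformly_over_pipeline_stages; infer_instance

-- ===== CLAIM (what is proved, stated in full; the proofs are below) =====
def Claim_equal_distribute_blocks_uniformly_over_pipeline_stages : Prop := ∀ (block_count : Int) (pipeline_parallelism_size : Int) (tensor_parallelism_size : Int), Dom_distribute_blocks_uniformly_over_pipeline_stages block_count pipeline_parallelism_size tensor_parallelism_size → Pre_distribute_blocks_uniformly_over_pipeline_stages block_count pipeline_parallelism_size tensor_parallelism_size → Spec_distribute_blocks_uniformly_over_pipeline_stages block_count pipeline_parallelism_size tensor_parallelism_size (distribute_blocks_uniformly_over_pipeline_stages block_count pipeline_parallelism_size tensor_parallelism_size)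

-- ===== LEMMAS AND PROOFS =====

-- ceiling division -((-a) // pp) is bracketed by (q-1)*pp < a ≤ q*pp
theorem pv_ceil_bounds (a pp : Int) (hpp : 0 < pp) :
    (-(PySem.Int.floordiv (-a) pp) - 1) * pp < a ∧ a ≤ -(PySem.Int.floordiv (-a) pp) * pp :=
  (PySem.Int.neg_floordiv_neg_eq_iff_of_pos hpp).mp rfl

-- a map that is constant on a unit-step range is a replicate
theorem pv_map_pyRange_const {g : Int → Int} {a b c : Int}
    (h : ∀ i, a ≤ i → i < b → g i = c) :
    (PySem.List.pyRange a b 1).map g = List.replicate (b - a).toNat c := by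
  have h1 : (PySem.List.pyRange a b 1).map g = (PySem.List.pyRange a b 1).map (fun _ => c) := by
    apply List.map_congr_left
    intro i hi
    rw [PySem.List.mem_pyRange_one] at hi
    exact h i hi.1 hi.2
  rw [h1, List.map_const', PySem.List.length_pyRange_one]

-- the stage-fill loop over the first n stages reproduces A's per-block map up to block ceil(n*bc/pp)
theorem pv_fill_prefix (bc pp : Int) (hpp : 0 < pp) (n : Nat) (hn : (n : Int) ≤ pp) :
    (PySem.List.pyRange 0 (n : Int) 1).foldl
      (fun (acc : List Int × Int) p =>
        let nxt := -(PySem.Int.floordiv (-(p + 1) * bc) pp)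
        (acc.1 ++ PySem.List.pyRepeat [p] (nxt - acc.2), nxt))
      ([], 0)
    = ((PySem.List.pyRange 0 (-(PySem.Int.floordiv (-((n : Int) * bc)) pp)) 1).map
         (fun i => PySem.Int.floordiv (i * pp) bc),
       -(PySem.Int.floordiv (-((n : Int) * bc)) pp)) := by
  induction n with
  | zero =>
      simp [PySem.List.pyRange_one_eq_nil, PySem.Int.floordiv]
  | succ n ih =>
      have hn' : (n : Int) ≤ pp := by push_cast at hn ⊢; omega
      have hsplit : PySem.List.pyRange 0 ((n : Int) + 1) 1
          = PySem.List.pyRange 0 (n : Int) 1 ++ [(n : Int)] :=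
        PySem.List.pyRange_one_succ_right (by positivity)
      have hcast : ((n + 1 : Nat) : Int) = (n : Int) + 1 := by push_cast; ring
      rw [hcast, hsplit, List.foldl_append, ih hn']
      simp only [List.foldl_cons, List.foldl_nil]
      set sn := -(PySem.Int.floordiv (-((n : Int) * bc)) pp) with hsn
      have hnxt : -(PySem.Int.floordiv (-((n : Int) + 1) * bc) pp)
          = -(PySem.Int.floordiv (-(((n : Int) + 1) * bc)) pp) := by ring_nf
      set sn1 := -(PySem.Int.floordiv (-(((n : Int) + 1) * bc)) pp) with hsn1
      have bn := pv_ceil_bounds ((n : Int) * bc) pp hpp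
      have bn1 := pv_ceil_bounds (((n : Int) + 1) * bc) pp hpp
      rw [← hsn] at bn; rw [← hsn1] at bn1
      rw [PySem.List.pyRepeat_singleton]
      refine Prod.ext ?_ (by simpa using hnxt)
      simp only [hnxt]
      rcases (by omega : bc ≤ 0 ∨ 0 < bc) with hbc | hbc
      · -- no blocks: every boundary is ≤ 0 and nonincreasing, everything stays empty
        have hsn1_le : sn1 ≤ sn := by
          have h1 : ((n : Int) + 1) * bc ≤ (n : Int) * bc := by nlinarith [Int.natCast_nonneg n]
          have : (sn1 - 1) * pp < sn * pp := lt_of_lt_of_le (lt_of_lt_of_le bn1.1 h1) bn.2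
          nlinarith
        have hsn_le : sn ≤ 0 := by
          have h0 : (n : Int) * bc ≤ 0 := by nlinarith [Int.natCast_nonneg n]
          have : (sn - 1) * pp < 0 := lt_of_lt_of_le bn.1 h0
          nlinarith
        have hsn1_le0 : sn1 ≤ 0 := le_trans hsn1_le hsn_le
        rw [PySem.List.pyRange_one_eq_nil hsn_le, PySem.List.pyRange_one_eq_nil hsn1_le0]
        simp [Int.toNat_of_nonpos (by omega : sn1 - sn ≤ 0)]
      · -- blocks exist: boundaries are nondecreasing and ≥ 0; the new segment is constant n
        have hsn_nonneg : 0 ≤ sn := by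
          have h0 : 0 ≤ (n : Int) * bc := by positivity
          nlinarith [bn.2]
        have hmono : sn ≤ sn1 := by
          have h1 : (n : Int) * bc ≤ ((n : Int) + 1) * bc := by nlinarith
          have : (sn - 1) * pp < sn1 * pp := lt_of_lt_of_le (lt_of_lt_of_le bn.1 h1) bn1.2
          nlinarith
        rw [PySem.List.pyRange_one_append 0 sn sn1 hsn_nonneg hmono, List.map_append]
        congr 1
        symm
        apply pv_map_pyRange_const
        intro i hi1 hi2
        rw [PySem.Int.floordiv_eq_iff_of_pos hbc]
        constructor
        · calc (n : Int) * bc ≤ sn * pp := bn.2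
            _ ≤ i * pp := by nlinarith
        · calc i * pp ≤ (sn1 - 1) * pp := by nlinarith
            _ < ((n : Int) + 1) * bc := bn1.1

-- the device lists agree: shifting range(tp) by p*tp is range(p*tp, (p+1)*tp)
theorem pv_devices_eq (tp p : Int) :
    (PySem.List.pyRange 0 tp 1).map (fun d => p * tp + d)
      = PySem.List.pyRange (p * tp) ((p + 1) * tp) 1 := by
  rw [PySem.List.pyRange_one, PySem.List.pyRange_one, List.map_map]
  have h1 : (p + 1) * tp - p * tp = tp - 0 := by ring
  rw [h1]
  apply List.map_congr_left
  intro k _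
  simp

-- ===== VERDICT (by name: the statement is the Claim_ definition above) =====
theorem distribute_blocks_uniformly_over_pipeline_stages_spec : Claim_equal_distribute_blocks_uniformly_over_pipeline_stages := by
  intro bc pp tp _ hpre
  unfold Spec_distribute_blocks_uniformly_over_pipeline_stages
  unfold distribute_blocks_uniformly_over_pipeline_stages distribute_blocks_uniformly_over_pipeline_stages_alt
  by_cases h1 : pp = 1
  · simp [h1]
  · simp only [if_neg h1]
    rcases (by omega : 0 < pp ∨ pp ≤ 0) with hpp | hpp
    · -- pp > 0: the stage fill reproduces the per-block map
      have hfold := pv_fill_prefix bc pp hpp pp.toNat (by omega)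
      rw [Int.toNat_of_nonneg (le_of_lt hpp)] at hfold
      have hend : -(PySem.Int.floordiv (-(pp * bc)) pp) = bc := by
        rw [PySem.Int.neg_floordiv_neg_eq_iff_of_pos hpp]
        constructor <;> nlinarith
      rw [hend] at hfold
      rw [hfold]
      simp only [Prod.mk.injEq, Option.some.injEq, true_and]
      exact List.map_congr_left (fun p _ => pv_devices_eq tp p)
    · -- pp ≤ 0 (and, by Pre_, bc ≤ 0): both sides are empty
      have hbc : bc ≤ 0 := by
        rcases hpre with h | h
        · omega
        · exact h
      rw [PySem.List.pyRange_one_eq_nil hpp, PySem.List.pyRange_one_eq_nil hbc]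
      simp
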